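-- pv_equiv track=rewrite | github.com/Ryutaro-horiuchi/self-development | algorithm/atcoder/ABC412/C.py | func
-- ===== SOURCE A (Python) =====
-- def func(S, start, cnt):
--   try:
--     ans = max([value for value in S if value <= start*2 and value > start])
--   except ValueError:
--     return -1
--
--   last = S[-1]
--   if ans >= last:
--     return cnt
--
--   return func(S, ans, cnt+1)
-- ===== SOURCE B (Python) =====
-- def func(S, start, cnt):
--     # Sort once, then find each step's candidate by binary search instead of
--     # rescanning the whole list: max of values in (start, start*2] is the
--     # largest element <= start*2 in the sorted copy.
--     if not S:
--         return -1
--     last = S[-1]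
--     T = sorted(S)
--     n = len(T)
--     while True:
--         t = start * 2
--         lo, hi = 0, n
--         while lo < hi:
--             mid = (lo + hi) // 2
--             if T[mid] <= t:
--                 lo = mid + 1
--             else:
--                 hi = mid
--         if lo == 0 or T[lo - 1] <= start:
--             return -1
--         ans = T[lo - 1]
--         if ans >= last:
--             return cnt
--         start = ans
--         cnt += 1
-- ===== Notes on version B (the rewrite author's own statement) =====
-- stated objective: faster
-- what changed: B replaces the per-step full-list max-of-comprehension and the recursion with one upfront sort plus an iterative loop that finds each step's candidate (largest element <= 2*start) by hand-written binary search on the sorted copy.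
import Mathlib
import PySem

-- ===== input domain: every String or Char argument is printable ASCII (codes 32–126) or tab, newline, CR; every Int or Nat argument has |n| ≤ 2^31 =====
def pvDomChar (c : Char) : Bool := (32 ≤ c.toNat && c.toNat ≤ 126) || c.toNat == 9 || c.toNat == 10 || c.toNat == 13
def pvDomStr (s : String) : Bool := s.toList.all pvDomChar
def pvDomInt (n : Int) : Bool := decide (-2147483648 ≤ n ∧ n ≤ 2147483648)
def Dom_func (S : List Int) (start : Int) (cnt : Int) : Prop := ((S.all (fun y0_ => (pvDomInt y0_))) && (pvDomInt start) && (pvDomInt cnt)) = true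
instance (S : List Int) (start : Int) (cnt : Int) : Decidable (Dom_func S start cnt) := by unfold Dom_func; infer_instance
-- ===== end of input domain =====

-- B sorts S once and binary-searches each doubling step instead of rescanning the whole list; same return value everywhere.

-- termination helpers (cited by name in each decreasing_by so the ports' fixpoints stay small):
-- stepping to a larger element strictly shrinks the set of elements above the cursor
theorem pvFilterGT_decrease (S : List Int) (a b : Int) (hb : b ∈ S) (hab : a < b) :
    (S.filter (fun v => decide (b < v))).length < (S.filter (fun v => decide (a < v))).length := by
  induction S with
  | nil => cases hb
  | cons x xs ih =>
    have hmono : (xs.filter (fun v => decide (b < v))).length ≤ (xs.filter (fun v => decide (a < v))).length := by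
      simp only [← List.countP_eq_length_filter]
      exact List.countP_mono_left (fun y _ hy => by simpa using lt_trans hab (by simpa using hy))
    rcases List.mem_cons.mp hb with rfl | hx
    · simp only [List.filter_cons, decide_eq_true_eq]
      rw [if_neg (by simp), if_pos (by simpa using hab)]
      simpa using Nat.lt_succ_of_le hmono
    · have := ih hx
      simp only [List.filter_cons, decide_eq_true_eq]
      split_ifs with h1 h2 h2 <;> simp <;> omega

theorem pvFunc_dec (S : List Int) (start ans : Int)
    (h : PySem.List.max? (S.filter (fun value => decide (value ≤ start * 2) && decide (value > start))) (fun x => x) = some ans) :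
    (S.filter (fun v => decide (ans < v))).length < (S.filter (fun v => decide (start < v))).length := by
  have hm := PySem.List.max?_mem h
  have hmf := List.mem_filter.mp hm
  have h2 : start < ans := by
    have := hmf.2
    simp only [Bool.and_eq_true, decide_eq_true_eq] at this
    exact this.2
  exact pvFilterGT_decrease S start ans hmf.1 h2

theorem pvBS_dec1 (lo hi : Nat) (h : lo < hi) : hi - ((lo + hi) / 2 + 1) < hi - lo := by omega

theorem pvBS_dec2 (lo hi : Nat) (h : lo < hi) : (lo + hi) / 2 - lo < hi - lo := by omega

-- ===== PORT A =====
def func (S : List Int) (start : Int) (cnt : Int) : Int :=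
  match h : PySem.List.max? (S.filter (fun value => decide (value ≤ start * 2) && decide (value > start))) (fun x => x) with
  | none => -1   -- max([]) raises ValueError -> return -1
  | some ans =>
    match PySem.List.pyGet? S (-1) with
    | none => -1   -- unreachable: the filtered list is nonempty, so S ≠ []
    | some last =>
      if ans ≥ last then cnt
      else func S ans (cnt + 1)
termination_by (S.filter (fun v => decide (start < v))).length
decreasing_by exact pvFunc_dec S start ans h

-- ===== PORT B =====
-- while lo < hi: mid = (lo+hi)//2 ... ; T[mid] is in range so List.getD is exact here
def pvBS (T : List Int) (t : Int) (lo hi : Nat) : Nat :=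
  if h : lo < hi then
    if T.getD ((lo + hi) / 2) 0 ≤ t then pvBS T t ((lo + hi) / 2 + 1) hi
    else pvBS T t lo ((lo + hi) / 2)
  else lo
termination_by hi - lo
decreasing_by
  · exact pvBS_dec1 lo hi h
  · exact pvBS_dec2 lo hi h

theorem pvBS_le (T : List Int) (t : Int) (lo hi : Nat) (h : lo ≤ hi) : pvBS T t lo hi ≤ hi := by
  fun_induction pvBS T t lo hi with
  | case1 lo hi hlt htest ih => exact ih (by omega)
  | case2 lo hi hlt htest ih => exact le_trans (ih (by omega)) (by omega)
  | case3 lo hi hlt => omega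

theorem pvGo_dec (T : List Int) (start : Int)
    (h0 : ¬ pvBS T (start * 2) 0 T.length = 0)
    (h1 : ¬ T.getD (pvBS T (start * 2) 0 T.length - 1) 0 ≤ start) :
    (T.filter (fun v => decide (T.getD (pvBS T (start * 2) 0 T.length - 1) 0 < v))).length
      < (T.filter (fun v => decide (start < v))).length := by
  have hle : pvBS T (start * 2) 0 T.length ≤ T.length := pvBS_le T (start * 2) 0 T.length (by omega)
  have hlt : pvBS T (start * 2) 0 T.length - 1 < T.length := by omega
  have hmem : T.getD (pvBS T (start * 2) 0 T.length - 1) 0 ∈ T := by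
    rw [List.getD_eq_getElem T 0 hlt]; exact List.getElem_mem hlt
  exact pvFilterGT_decrease T start _ hmem (by omega)


-- the while-True outer loop of B, on the sorted copy T
def pvGo (T : List Int) (last : Int) (start : Int) (cnt : Int) : Int :=
  if h0 : pvBS T (start * 2) 0 T.length = 0 then -1
  else if h1 : T.getD (pvBS T (start * 2) 0 T.length - 1) 0 ≤ start then -1
  else if T.getD (pvBS T (start * 2) 0 T.length - 1) 0 ≥ last then cnt
  else pvGo T last (T.getD (pvBS T (start * 2) 0 T.length - 1) 0) (cnt + 1)
termination_by (T.filter (fun v => decide (start < v))).length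
decreasing_by exact pvGo_dec T start h0 h1

def func_alt (S : List Int) (start : Int) (cnt : Int) : Int :=
  match PySem.List.pyGet? S (-1) with
  | none => -1   -- "if not S: return -1"
  | some last => pvGo (PySem.List.sorted S (fun x => x) false) last start cnt

-- ===== PRECONDITION & SPEC =====
def Spec_func (S : List Int) (start : Int) (cnt : Int) (out : Int) : Prop := out = func_alt S start cnt
instance (S : List Int) (start : Int) (cnt : Int) (out : Int) : Decidable (Spec_func S start cnt out) := by unfold Spec_func; infer_instance

-- ===== CLAIM (what is proved, stated in full; the proofs are below) =====
def Claim_equal_func : Prop := ∀ (S : List Int) (start : Int) (cnt : Int), Dom_func S start cnt → Spec_func S start cnt (func S start cnt)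

-- ===== LEMMAS AND PROOFS =====

-- binary-search postcondition on a sorted list
theorem pvBS_spec (T : List Int) (hT : T.Pairwise (· ≤ ·)) (t : Int) (lo hi : Nat)
    (hle : hi ≤ T.length)
    (hlo : ∀ i (h : i < T.length), i < lo → T[i] ≤ t)
    (hhi : ∀ i (h : i < T.length), hi ≤ i → t < T[i]) :
    (∀ i (h : i < T.length), i < pvBS T t lo hi → T[i] ≤ t) ∧
    (∀ i (h : i < T.length), pvBS T t lo hi ≤ i → t < T[i]) := by
  have hmono : ∀ (p q : Nat) (hp : p < T.length) (hq : q < T.length), p ≤ q → T[p] ≤ T[q] := by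
    intro p q hp hq hpq
    rcases Nat.lt_or_ge p q with h | h
    · exact (List.pairwise_iff_getElem.mp hT) p q hp hq h
    · have : p = q := by omega
      subst this; exact le_rfl
  fun_induction pvBS T t lo hi with
  | case1 lo hi hlt htest ih =>
    have hmidlt : (lo + hi) / 2 < T.length := by omega
    rw [List.getD_eq_getElem T 0 hmidlt] at htest
    refine ih hle ?_ hhi
    intro i h hi'
    exact le_trans (hmono i ((lo + hi) / 2) h hmidlt (by omega)) htest
  | case2 lo hi hlt htest ih =>
    have hmidlt : (lo + hi) / 2 < T.length := by omega
    rw [List.getD_eq_getElem T 0 hmidlt] at htest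
    refine ih (by omega) hlo ?_
    intro i h hi'
    exact lt_of_lt_of_le (by omega) (hmono ((lo + hi) / 2) i hmidlt h hi')
  | case3 lo hi hlt =>
    exact ⟨fun i h hi' => hlo i h hi', fun i h hi' => hhi i h (by omega)⟩

-- one step of both programs agrees, and the recursion is handled by induction on the measure
theorem pvMain (S : List Int) (last : Int) (hlast : PySem.List.pyGet? S (-1) = some last) :
    ∀ (m : Nat) (start cnt : Int), (S.filter (fun v => decide (start < v))).length ≤ m →
      func S start cnt = pvGo (PySem.List.sorted S (fun x => x) false) last start cnt := by
  have hpair : ∀ start : Int, (PySem.List.sorted S (fun x => x) false).Pairwise (· ≤ ·) := by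
    intro _; simpa using PySem.List.sorted_pairwise (xs := S) (key := fun x => x)
  intro m
  induction m with
  | zero =>
    intro start cnt hm
    have hfil0 : S.filter (fun v => decide (start < v)) = [] :=
      List.length_eq_zero_iff.mp (Nat.le_zero.mp hm)
    have hnogt : ∀ v ∈ S, ¬ start < v := by
      intro v hv hlt
      have : v ∈ S.filter (fun v => decide (start < v)) := List.mem_filter.mpr ⟨hv, by simpa⟩
      simp [hfil0] at this
    have hfil : S.filter (fun value => decide (value ≤ start * 2) && decide (value > start)) = [] := by
      refine List.filter_eq_nil_iff.mpr ?_
      intro v hv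
      simp only [Bool.and_eq_true, decide_eq_true_eq, not_and, gt_iff_lt]
      exact fun _ => hnogt v hv
    rw [func]
    split
    · rw [pvGo]
      by_cases hL : pvBS (PySem.List.sorted S (fun x => x) false) (start * 2) 0
          (PySem.List.sorted S (fun x => x) false).length = 0
      · rw [dif_pos hL]
      · rw [dif_neg hL]
        have hle0 := pvBS_le (PySem.List.sorted S (fun x => x) false) (start * 2) 0
          (PySem.List.sorted S (fun x => x) false).length (by omega)
        have hlt : pvBS (PySem.List.sorted S (fun x => x) false) (start * 2) 0
            (PySem.List.sorted S (fun x => x) false).length - 1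
            < (PySem.List.sorted S (fun x => x) false).length := by omega
        have hmem : (PySem.List.sorted S (fun x => x) false).getD
            (pvBS (PySem.List.sorted S (fun x => x) false) (start * 2) 0
              (PySem.List.sorted S (fun x => x) false).length - 1) 0 ∈ S := by
          rw [List.getD_eq_getElem _ 0 hlt]
          exact (PySem.List.mem_sorted S (fun x => x) false _).mp (List.getElem_mem hlt)
        rw [dif_pos (not_lt.mp (hnogt _ hmem))]
    · rename_i ans heq
      exfalso
      have := PySem.List.max?_mem heq
      simp [hfil] at this
  | succ m ih =>
    intro start cnt hm
    obtain ⟨P1, P2⟩ := pvBS_spec (PySem.List.sorted S (fun x => x) false) (hpair start)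
      (start * 2) 0 (PySem.List.sorted S (fun x => x) false).length le_rfl
      (by intro i h hi; omega) (by intro i h hi; omega)
    have hle0 := pvBS_le (PySem.List.sorted S (fun x => x) false) (start * 2) 0
      (PySem.List.sorted S (fun x => x) false).length (by omega)
    by_cases hL : pvBS (PySem.List.sorted S (fun x => x) false) (start * 2) 0
        (PySem.List.sorted S (fun x => x) false).length = 0
    · -- every element exceeds start*2: both return -1
      have hfil : S.filter (fun value => decide (value ≤ start * 2) && decide (value > start)) = [] := by
        refine List.filter_eq_nil_iff.mpr ?_
        intro v hv
        obtain ⟨i, h, hveq⟩ := List.mem_iff_getElem.mp ((PySem.List.mem_sorted S (fun x => x) false v).mpr hv)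
        have := P2 i h (by omega)
        rw [hveq] at this
        simp only [Bool.and_eq_true, decide_eq_true_eq, not_and]
        omega
      rw [func]
      split
      · rw [pvGo, dif_pos hL]
      · rename_i ans heq
        exfalso
        have := PySem.List.max?_mem heq
        simp [hfil] at this
    · have hlt : pvBS (PySem.List.sorted S (fun x => x) false) (start * 2) 0
          (PySem.List.sorted S (fun x => x) false).length - 1
          < (PySem.List.sorted S (fun x => x) false).length := by omega
      have hansD : (PySem.List.sorted S (fun x => x) false).getD
          (pvBS (PySem.List.sorted S (fun x => x) false) (start * 2) 0
            (PySem.List.sorted S (fun x => x) false).length - 1) 0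
          = (PySem.List.sorted S (fun x => x) false)[pvBS (PySem.List.sorted S (fun x => x) false)
              (start * 2) 0 (PySem.List.sorted S (fun x => x) false).length - 1] :=
        List.getD_eq_getElem _ 0 hlt
      set L := pvBS (PySem.List.sorted S (fun x => x) false) (start * 2) 0
        (PySem.List.sorted S (fun x => x) false).length with hLdef
      set ans := (PySem.List.sorted S (fun x => x) false)[L - 1] with hansdef
      have hans2 : ans ≤ start * 2 := P1 (L - 1) hlt (by omega)
      have hansS : ans ∈ S := (PySem.List.mem_sorted S (fun x => x) false _).mp (List.getElem_mem hlt)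
      -- any element of the filtered list is ≤ ans
      have hub : ∀ v ∈ S, v ≤ start * 2 → v ≤ ans := by
        intro v hv hv2
        obtain ⟨i, h, hveq⟩ := List.mem_iff_getElem.mp ((PySem.List.mem_sorted S (fun x => x) false v).mpr hv)
        rcases Nat.lt_or_ge i L with hi | hi
        · rw [← hveq]
          exact PySem.List.sorted_id_getElem_mono S (p := i) (q := L - 1) (by omega) hlt
        · have := P2 i h hi
          rw [hveq] at this
          omega
      by_cases hbig : ans ≤ start
      · -- no candidate above start: both return -1
        have hfil : S.filter (fun value => decide (value ≤ start * 2) && decide (value > start)) = [] := by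
          refine List.filter_eq_nil_iff.mpr ?_
          intro v hv
          simp only [Bool.and_eq_true, decide_eq_true_eq, not_and, gt_iff_lt]
          intro hv2
          have := hub v hv hv2
          omega
        rw [func]
        split
        · rw [pvGo, dif_neg hL, dif_pos (by rw [hansD]; exact hbig)]
        · rename_i a heq
          exfalso
          have := PySem.List.max?_mem heq
          simp [hfil] at this
      · -- the candidate list is nonempty and its maximum is ans
        have hansfil : ans ∈ S.filter (fun value => decide (value ≤ start * 2) && decide (value > start)) :=
          List.mem_filter.mpr ⟨hansS, by simp; omega⟩
        have hmax : PySem.List.max?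
            (S.filter (fun value => decide (value ≤ start * 2) && decide (value > start))) (fun x => x)
            = some ans := by
          cases hmx : PySem.List.max?
              (S.filter (fun value => decide (value ≤ start * 2) && decide (value > start))) (fun x => x) with
          | none =>
            exfalso
            rw [PySem.List.max?_eq_none_iff] at hmx
            simp [hmx] at hansfil
          | some mx =>
            have hmxm := PySem.List.max?_mem hmx
            have h1 : ans ≤ mx := PySem.List.max?_isMax hmx ans hansfil
            obtain ⟨hmxS, hmxp⟩ := List.mem_filter.mp hmxm
            simp only [Bool.and_eq_true, decide_eq_true_eq, gt_iff_lt] at hmxp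
            have h2 : mx ≤ ans := hub mx hmxS hmxp.1
            rw [le_antisymm h1 h2]
        rw [func]
        split
        · rename_i heq; rw [hmax] at heq; cases heq
        · rename_i a heq
          rw [hmax] at heq
          injection heq with heq; subst heq
          rw [hlast, pvGo, dif_neg hL, dif_neg (by rw [hansD]; exact hbig), hansD]
          show (if ans ≥ last then cnt else func S ans (cnt + 1))
              = if ans ≥ last then cnt
                else pvGo (PySem.List.sorted S (fun x => x) false) last ans (cnt + 1)
          split_ifs with hge
          · rfl
          · refine ih ans (cnt + 1) ?_
            have hdec := pvFilterGT_decrease S start ans hansS (by omega)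
            omega

-- ===== VERDICT (by name: the statement is the Claim_ definition above) =====
theorem func_spec : Claim_equal_func := by
  intro S start cnt _
  unfold Spec_func func_alt
  cases hlast : PySem.List.pyGet? S (-1) with
  | none =>
    have hS : S = [] := by
      rw [PySem.List.pyGet?_neg_one] at hlast
      exact List.getLast?_eq_none_iff.mp hlast
    subst hS
    rw [func]
    simp [PySem.List.max?]
  | some last => exact pvMain S last hlast _ start cnt le_rfl
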